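-- pv_equiv track=rewrite | github.com/lttrung2001/chuyen-de-cong-nghe-phan-mem | BT3/front_coding.py | front_coding
-- ===== SOURCE A (Python) =====
-- def front_coding(strings):
--     # Find the common prefix of all strings
--     prefix_len = 0
--     for i in range(min([len(s) for s in strings])):
--         if len(set([s[i] for s in strings])) > 1:
--             break
--         prefix_len += 1
--     prefix = strings[0][:prefix_len]
--
--     # Create the encoded string
--     encoded = str(len(strings)) + '|' + str(prefix_len) + '|' + prefix
--
--     for string in strings:
--         # Add the remaining part of the string after the prefix
--         encoded += string[prefix_len:]
--
--     return encoded
-- ===== SOURCE B (Python) =====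
-- def _lcp2(x, y):
--     out = []
--     for a, b in zip(x, y):
--         if a != b:
--             break
--         out.append(a)
--     return ''.join(out)
--
--
-- def front_coding(strings):
--     prefix = strings[0]
--     for s in strings[1:]:
--         prefix = _lcp2(prefix, s)
--     n = len(prefix)
--     return str(len(strings)) + '|' + str(n) + '|' + prefix + ''.join(s[n:] for s in strings)
-- ===== Notes on version B (the rewrite author's own statement) =====
-- stated objective: alternative
-- what changed: Replaces A's column-wise scan that builds a set of the i-th characters of all strings for each column with a left fold of a two-string longest-common-prefix walk over the list of strings.
import Mathlib
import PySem

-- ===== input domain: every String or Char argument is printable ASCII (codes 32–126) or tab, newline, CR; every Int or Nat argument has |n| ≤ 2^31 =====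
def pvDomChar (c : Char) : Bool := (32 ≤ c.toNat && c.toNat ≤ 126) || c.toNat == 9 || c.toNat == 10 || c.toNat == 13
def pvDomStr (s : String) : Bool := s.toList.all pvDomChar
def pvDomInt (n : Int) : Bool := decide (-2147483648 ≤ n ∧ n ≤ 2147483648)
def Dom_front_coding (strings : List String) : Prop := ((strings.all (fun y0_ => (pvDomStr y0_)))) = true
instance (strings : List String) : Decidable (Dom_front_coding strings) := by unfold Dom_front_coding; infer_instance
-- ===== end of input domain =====

-- B replaces A's column-wise set-of-i-th-characters scan with a left fold of a two-string
-- longest-common-prefix walk over the strings (objective: alternative).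

-- ===== PORT A =====
-- the 'for i in range(m): if len(set(...)) > 1: break; prefix_len += 1' loop;
-- i is the loop counter (= prefix_len so far), fuel = m - i iterations remain;
-- s.getD i ' ' is s[i], in range because i < m ≤ len(s).
def frontLoop (ss : List (List Char)) : Nat → Nat → Nat
  | i, 0 => i
  | i, fuel+1 =>
    if 1 < (PySem.Set.ofList (ss.map (fun s => s.getD i ' '))).length then i
    else frontLoop ss (i+1) fuel

def front_coding (strings : List String) : String :=
  let ss := strings.map String.toList
  -- min([len(s) for s in strings]); raises ValueError on [] (excluded by Pre_), so getD is safe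
  let m := (PySem.List.min? (ss.map (fun s => s.length)) (fun x => x)).getD 0
  let prefix_len := frontLoop ss 0 m
  -- strings[0][:prefix_len]; index 0 in range under Pre_
  let pre := PySem.List.slice (ss.getD 0 []) none (some (prefix_len : Int))
  let encoded := PySem.Int.toChars (strings.length : Int) ++ ['|'] ++
                 PySem.Int.toChars (prefix_len : Int) ++ ['|'] ++ pre
  String.ofList (ss.foldl (fun e s => e ++ PySem.List.slice s (some (prefix_len : Int)) none) encoded)

-- ===== PORT B =====
-- _lcp2: walk the two strings together (zip with break), collecting equal characters
def lcp2 : List Char → List Char → List Char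
  | x :: xs, y :: ys => if x ≠ y then [] else x :: lcp2 xs ys
  | _, _ => []

def front_coding_alt (strings : List String) : String :=
  let ss := strings.map String.toList
  match ss with
  | [] => ""  -- unreachable under Pre_ (the Python B raises IndexError on [])
  | h :: t =>
    let p := t.foldl lcp2 h          -- prefix = reduce of _lcp2, seeded with strings[0]
    let n := p.length
    String.ofList (PySem.Int.toChars (strings.length : Int) ++ ['|'] ++
               PySem.Int.toChars (n : Int) ++ ['|'] ++ p ++
               ((h :: t).map (fun s => s.drop n)).flatten)

-- ===== PRECONDITION & SPEC =====
-- Pre_ excludes only the empty list, on which A raises ValueError (min of an empty sequence).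
def Pre_front_coding (strings : List String) : Prop := strings ≠ []
instance (strings : List String) : Decidable (Pre_front_coding strings) := by
  unfold Pre_front_coding; infer_instance

def pvWitness_front_coding : List String := ["abc", "abd"]

def Spec_front_coding (strings : List String) (out : String) : Prop := out = front_coding_alt strings
instance (strings : List String) (out : String) : Decidable (Spec_front_coding strings out) := by
  unfold Spec_front_coding; infer_instance

-- ===== CLAIM (what is proved, stated in full; the proofs are below) =====
def Claim_equal_front_coding : Prop := ∀ (strings : List String), Dom_front_coding strings →
  Pre_front_coding strings → Spec_front_coding strings (front_coding strings)

-- ===== LEMMAS AND PROOFS =====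

theorem lcp2_prefix_left : ∀ x y : List Char, lcp2 x y <+: x
  | [], _ => by simp [lcp2]
  | _ :: _, [] => by simp [lcp2]
  | a :: x, b :: y => by
    by_cases h : a = b
    · simpa [lcp2, h] using lcp2_prefix_left x y
    · simp [lcp2, h]

theorem lcp2_prefix_right : ∀ x y : List Char, lcp2 x y <+: y
  | [], _ => by simp [lcp2]
  | _ :: _, [] => by simp [lcp2]
  | a :: x, b :: y => by
    by_cases h : a = b
    · subst h; simpa [lcp2] using lcp2_prefix_right x y
    · simp [lcp2, h]

theorem prefix_lcp2 : ∀ {q x y : List Char}, q <+: x → q <+: y → q <+: lcp2 x y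
  | [], _, _, _, _ => by simp
  | c :: q, x, y, hx, hy => by
    obtain ⟨u, rfl⟩ := hx
    obtain ⟨v, hv⟩ := hy
    cases y with
    | nil => simp at hv
    | cons b y =>
      cases hv
      simpa [lcp2] using prefix_lcp2 (q.prefix_append u) ⟨v, rfl⟩

theorem foldl_lcp2_prefix_head : ∀ (t : List (List Char)) (h : List Char), t.foldl lcp2 h <+: h
  | [], _ => List.prefix_refl _
  | s :: t, h =>
    ((foldl_lcp2_prefix_head t (lcp2 h s)).trans (lcp2_prefix_left h s))

theorem foldl_lcp2_prefix_mem : ∀ (t : List (List Char)) (h s : List Char), s ∈ t →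
    t.foldl lcp2 h <+: s := by
  intro t
  induction t with
  | nil => intro _ _ hs; simp at hs
  | cons a t ih =>
    intro h s hs
    rcases List.mem_cons.mp hs with rfl | hs
    · exact (foldl_lcp2_prefix_head t (lcp2 h s)).trans (lcp2_prefix_right h s)
    · exact ih (lcp2 h a) s hs

theorem foldl_lcp2_max : ∀ (t : List (List Char)) (h q : List Char), q <+: h →
    (∀ s ∈ t, q <+: s) → q <+: t.foldl lcp2 h := by
  intro t
  induction t with
  | nil => intro _ _ hq _; exact hq
  | cons a t ih =>
    intro h q hq hall
    exact ih (lcp2 h a) q (prefix_lcp2 hq (hall a (by simp))) (fun s hs => hall s (by simp [hs]))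

-- len(set(l)) ≤ 1 ↔ all elements of l are equal
theorem set_len_le_one_iff : ∀ (l : List Char),
    (PySem.Set.ofList l).length ≤ 1 ↔ ∀ a ∈ l, ∀ b ∈ l, a = b := by
  intro l
  induction l with
  | nil => simp [PySem.Set.ofList_nil]
  | cons x l _ =>
    rw [PySem.Set.ofList_cons]
    constructor
    · intro hlen a ha b hb
      have hnil : PySem.Set.discard (PySem.Set.ofList l) x = [] := by
        cases hd : PySem.Set.discard (PySem.Set.ofList l) x with
        | nil => rfl
        | cons z zs => simp [hd] at hlen
      have hall : ∀ y ∈ l, y = x := by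
        intro y hy
        by_contra hne
        have : y ∈ PySem.Set.discard (PySem.Set.ofList l) x :=
          (PySem.Set.mem_discard _ _ _).mpr ⟨(PySem.Set.mem_ofList _ _).mpr hy, hne⟩
        simp [hnil] at this
      rcases List.mem_cons.mp ha with rfl | ha' <;> rcases List.mem_cons.mp hb with rfl | hb'
      · rfl
      · exact (hall b hb').symm
      · exact hall a ha'
      · exact (hall a ha').trans (hall b hb').symm
    · intro hall
      have hnil : PySem.Set.discard (PySem.Set.ofList l) x = [] := by
        rw [List.eq_nil_iff_forall_not_mem]
        intro y hy
        have := (PySem.Set.mem_discard _ _ _).mp hy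
        exact this.2 (hall y (by simp [(PySem.Set.mem_ofList _ _).mp this.1]) x (by simp))
      simp [hnil]

-- a prefix q of s agrees with s at every position below q.length
theorem prefix_getD {q s : List Char} (hp : q <+: s) {i : Nat} (hi : i < q.length) (d : Char) :
    s.getD i d = q.getD i d := by
  obtain ⟨u, rfl⟩ := hp
  rw [List.getD_eq_getElem _ _ (by simp; omega), List.getD_eq_getElem _ _ hi]
  exact List.getElem_append_left hi

-- extend a common prefix of length i by one agreeing character
theorem take_succ_prefix {h s : List Char} {i : Nat} (hpre : h.take i <+: s)
    (hih : i < h.length) (his : i < s.length) (hc : h.getD i ' ' = s.getD i ' ') :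
    h.take (i+1) <+: s := by
  have htk : h.take i = s.take i := by
    have := List.prefix_iff_eq_take.mp hpre
    simpa [List.length_take, Nat.min_eq_left hih.le] using this
  have hget : h[i] = s[i] := by
    rw [← List.getD_eq_getElem h ' ' hih, ← List.getD_eq_getElem s ' ' his]; exact hc
  have : h.take (i+1) = s.take (i+1) := by
    rw [List.take_succ_eq_append_getElem hih, List.take_succ_eq_append_getElem his, htk, hget]
  rw [this]
  exact List.take_prefix _ _

-- main invariant for A's loop: starting at i with fuel m - i and a common prefix of length i,
-- the loop returns the length of the (unique maximal) common prefix
theorem frontLoop_spec (h : List Char) (t : List (List Char)) (m : Nat)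
    (hwit : ∃ s ∈ h :: t, List.length s = m) (hmin : ∀ s ∈ h :: t, m ≤ s.length) :
    ∀ (fuel i : Nat), i + fuel = m → (∀ s ∈ h :: t, h.take i <+: s) →
      (∀ s ∈ h :: t, h.take (frontLoop (h :: t) i fuel) <+: s) ∧
      (∀ q : List Char, (∀ s ∈ h :: t, q <+: s) → q.length ≤ frontLoop (h :: t) i fuel) ∧
      frontLoop (h :: t) i fuel ≤ m := by
  intro fuel
  induction fuel with
  | zero =>
    intro i hi hpre
    refine ⟨by simpa [frontLoop] using hpre, ?_, by simp [frontLoop]; omega⟩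
    intro q hq
    obtain ⟨s, hs, hsl⟩ := hwit
    have := (hq s hs).length_le
    simp [frontLoop]; omega
  | succ fuel ih =>
    intro i hi hpre
    by_cases hc : 1 < (PySem.Set.ofList ((h :: t).map (fun s => s.getD i ' '))).length
    · rw [frontLoop, if_pos hc]
      refine ⟨hpre, ?_, by omega⟩
      intro q hq
      by_contra hlt
      push Not at hlt
      have hall : ∀ a ∈ (h :: t).map (fun s => s.getD i ' '), ∀ b ∈ (h :: t).map (fun s => s.getD i ' '), a = b := by
        intro a ha b hb
        obtain ⟨sa, hsa, rfl⟩ := List.mem_map.mp ha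
        obtain ⟨sb, hsb, rfl⟩ := List.mem_map.mp hb
        rw [prefix_getD (hq sa hsa) (by omega), prefix_getD (hq sb hsb) (by omega)]
      exact absurd ((set_len_le_one_iff _).mpr hall) (by omega)
    · rw [frontLoop, if_neg hc]
      have him : i < m := by omega
      have hall := (set_len_le_one_iff _).mp (by omega : (PySem.Set.ofList ((h :: t).map (fun s => s.getD i ' '))).length ≤ 1)
      refine ih (i+1) (by omega) ?_
      intro s hs
      refine take_succ_prefix (hpre s hs) ?_ ?_ ?_
      · exact lt_of_lt_of_le him (hmin h (by simp))
      · exact lt_of_lt_of_le him (hmin s hs)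
      · exact hall _ (List.mem_map.mpr ⟨h, by simp, rfl⟩) _ (List.mem_map.mpr ⟨s, hs, rfl⟩)

-- A's loop computes exactly the length of B's folded LCP
theorem frontLoop_eq_foldl (h : List Char) (t : List (List Char)) (m : Nat)
    (hwit : ∃ s ∈ h :: t, List.length s = m) (hmin : ∀ s ∈ h :: t, m ≤ s.length) :
    frontLoop (h :: t) 0 m = (t.foldl lcp2 h).length := by
  obtain ⟨hcom, hmax, hle⟩ := frontLoop_spec h t m hwit hmin m 0 (by omega) (by simp)
  set r := frontLoop (h :: t) 0 m with hr
  set p := t.foldl lcp2 h with hp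
  have hple : p.length ≤ r := by
    refine hmax p ?_
    intro s hs
    rcases List.mem_cons.mp hs with rfl | hs'
    · exact foldl_lcp2_prefix_head t s
    · exact foldl_lcp2_prefix_mem t h s hs'
  have hrp : h.take r <+: p := by
    refine foldl_lcp2_max t h _ (List.take_prefix _ _) ?_
    intro s hs; exact hcom s (by simp [hs])
  have hlen : (h.take r).length = r := by
    have : m ≤ h.length := hmin h (by simp)
    simp [List.length_take]; omega
  have := hrp.length_le
  omega

-- take r h equals the folded LCP when r is its length
theorem take_eq_foldl (h : List Char) (t : List (List Char)) :
    h.take (t.foldl lcp2 h).length = t.foldl lcp2 h :=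
  (List.prefix_iff_eq_take.mp (foldl_lcp2_prefix_head t h)).symm

-- ===== VERDICT (by name: the statement is the Claim_ definition above) =====
theorem front_coding_spec : Claim_equal_front_coding := by
  intro strings _ hpre
  unfold Spec_front_coding front_coding front_coding_alt
  cases strings with
  | nil => exact absurd rfl hpre
  | cons s0 rest =>
    simp only [List.map_cons]
    set h := s0.toList with hh
    set t := rest.map String.toList with ht
    -- the minimum length
    cases hm : PySem.List.min? ((h :: t).map (fun s => s.length)) (fun x => x) with
    | none =>
      rw [PySem.List.min?_eq_none_iff] at hm
      exact absurd hm (by simp)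
    | some m =>
      have hwit : ∃ s ∈ h :: t, List.length s = m := by
        obtain ⟨s, hs, hsl⟩ := List.mem_map.mp (PySem.List.min?_mem hm)
        exact ⟨s, hs, hsl⟩
      have hmin : ∀ s ∈ h :: t, m ≤ s.length := by
        intro s hs
        exact PySem.List.min?_isMin hm _ (List.mem_map.mpr ⟨s, hs, rfl⟩)
      have hkey := frontLoop_eq_foldl h t m hwit hmin
      rw [List.map_cons] at hm
      simp only [hm, Option.getD_some, hkey]
      rw [PySem.List.foldl_append_eq_flatMap]
      congr 1
      simp only [PySem.List.slice_to_natCast, PySem.List.slice_from_natCast, List.getD_cons_zero,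
        take_eq_foldl, List.flatMap_def, List.map_cons]
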